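-- pv_equiv track=rewrite | github.com/MrHamdulay/csc3-capstone | examples/data/Assignment_7/skhmth003/util.py | copy_grid
-- ===== SOURCE A (Python) =====
-- height=4
--
-- def copy_grid (grid):
--     """return a copy of the grid"""
--     grid_new=[]
--     grid_temp=[]
--     j=0
--     for row in range(height):
--         for col in range(height):
--             grid_temp.append(grid[row][col])
--     for i in range(height):
--         grid_new.append(grid_temp[j:j+4])
--         j+=4
--     return grid_new
-- ===== SOURCE B (Python) =====
-- def copy_grid(grid):
--     """return a copy of the grid"""
--     return [[grid[row][col] for col in range(4)] for row in range(4)]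
-- ===== Notes on version B (the rewrite author's own statement) =====
-- stated objective: simpler
-- what changed: B builds the 4x4 copy directly with a nested per-element comprehension instead of A's two passes (flatten into a 16-element temporary list, then re-chunk it with slices and a running offset).
import Mathlib
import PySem

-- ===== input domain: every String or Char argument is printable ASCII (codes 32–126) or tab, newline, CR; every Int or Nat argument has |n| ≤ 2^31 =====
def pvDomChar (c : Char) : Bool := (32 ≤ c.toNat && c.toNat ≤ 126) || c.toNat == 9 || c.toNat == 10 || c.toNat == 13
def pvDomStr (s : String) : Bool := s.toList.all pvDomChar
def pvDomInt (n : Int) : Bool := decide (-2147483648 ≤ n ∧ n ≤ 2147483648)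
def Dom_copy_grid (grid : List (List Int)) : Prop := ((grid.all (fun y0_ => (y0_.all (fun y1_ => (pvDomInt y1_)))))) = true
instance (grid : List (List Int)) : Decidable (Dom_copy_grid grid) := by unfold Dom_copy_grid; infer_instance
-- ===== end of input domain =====

-- B replaces A's flatten-then-rechunk two-pass structure by a single nested per-element pass; return-value equivalence on grids with at least 4 rows of at least 4 entries.

-- ===== PORT A =====
def copy_grid (grid : List (List Int)) : List (List Int) :=
  -- grid_temp: flatten the first 4 entries of the first 4 rows, element by element
  let grid_temp : List Int :=
    (PySem.List.pyRange 0 4 1).foldl (fun acc row =>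
      (PySem.List.pyRange 0 4 1).foldl (fun acc2 col =>
        acc2 ++ [PySem.List.pyGetD (PySem.List.pyGetD grid row []) col 0]) acc) []
  -- grid_new: re-chunk grid_temp with slices and a running offset j
  let st : List (List Int) × Int :=
    (PySem.List.pyRange 0 4 1).foldl (fun st _ =>
      (st.1 ++ [PySem.List.slice grid_temp (some st.2) (some (st.2 + 4))], st.2 + 4)) ([], 0)
  st.1

-- ===== PORT B =====
def copy_grid_alt (grid : List (List Int)) : List (List Int) :=
  (PySem.List.pyRange 0 4 1).map (fun row =>
    (PySem.List.pyRange 0 4 1).map (fun col =>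
      PySem.List.pyGetD (PySem.List.pyGetD grid row []) col 0))

-- ===== PRECONDITION & SPEC =====
-- Pre_: exactly the grids on which the Python A returns (otherwise grid[row][col] raises IndexError):
-- at least 4 rows, and each of the first 4 rows has at least 4 entries.
def Pre_copy_grid (grid : List (List Int)) : Prop :=
  4 ≤ grid.length ∧ ∀ row ∈ grid.take 4, 4 ≤ row.length
instance (grid : List (List Int)) : Decidable (Pre_copy_grid grid) := by unfold Pre_copy_grid; infer_instance
def pvWitness_copy_grid : List (List Int) :=
  [[1,2,3,4],[5,6,7,8],[9,10,11,12],[13,14,15,16]]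
def Spec_copy_grid (grid : List (List Int)) (out : List (List Int)) : Prop := out = copy_grid_alt grid
instance (grid : List (List Int)) (out : List (List Int)) : Decidable (Spec_copy_grid grid out) := by unfold Spec_copy_grid; infer_instance

-- ===== CLAIM (what is proved, stated in full; the proofs are below) =====
def Claim_equal_copy_grid : Prop := ∀ (grid : List (List Int)), Dom_copy_grid grid → Pre_copy_grid grid → Spec_copy_grid grid (copy_grid grid)

-- ===== LEMMAS AND PROOFS =====
theorem pyRange04 : PySem.List.pyRange 0 4 1 = [0, 1, 2, 3] := by decide

-- ===== VERDICT (by name: the statement is the Claim_ definition above) =====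
theorem copy_grid_spec : Claim_equal_copy_grid := by
  intro grid _ _
  unfold Spec_copy_grid copy_grid copy_grid_alt
  simp [pyRange04, List.foldl, PySem.List.slice]
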